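-- pv_equiv track=rewrite | github.com/MDiakhate12/edi-parser | modules/worst_case_edi_layer.py | check_numbers_in_order
-- ===== SOURCE A (Python) =====
-- def check_numbers_in_order(lst, max_value):
--     n = len(lst)
--     result = []
--
--     for i in range(1, n - 1):
--         current_element = lst[i]
--         next_element = lst[(i + 1) % n]
--         prev_element = lst[i - 1]
--
--         # Check if the next and previous elements are not in the right order
--         if (current_element >= next_element) or (current_element <= prev_element):
--             result.append(i)
--
--     return result
-- ===== SOURCE B (Python) =====
-- def check_numbers_in_order(lst, max_value):
--     n = len(lst)
--     # pass 1: adjacency table inc[j] = lst[j] < lst[j+1]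
--     inc = [lst[j] < lst[j + 1] for j in range(n - 1)]
--     # pass 2: an interior index is out of order iff either adjacent pair is non-increasing
--     return [i for i in range(1, n - 1) if not inc[i - 1] or not inc[i]]
-- ===== Notes on version B (the rewrite author's own statement) =====
-- stated objective: alternative
-- what changed: B first precomputes a boolean adjacency table inc[j] = (lst[j] < lst[j+1]) in one pass, then selects interior indices from that table in a second pass, instead of A's single interleaved loop that re-reads three elements (with a redundant (i+1)%n wraparound) per index.
import Mathlib
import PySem

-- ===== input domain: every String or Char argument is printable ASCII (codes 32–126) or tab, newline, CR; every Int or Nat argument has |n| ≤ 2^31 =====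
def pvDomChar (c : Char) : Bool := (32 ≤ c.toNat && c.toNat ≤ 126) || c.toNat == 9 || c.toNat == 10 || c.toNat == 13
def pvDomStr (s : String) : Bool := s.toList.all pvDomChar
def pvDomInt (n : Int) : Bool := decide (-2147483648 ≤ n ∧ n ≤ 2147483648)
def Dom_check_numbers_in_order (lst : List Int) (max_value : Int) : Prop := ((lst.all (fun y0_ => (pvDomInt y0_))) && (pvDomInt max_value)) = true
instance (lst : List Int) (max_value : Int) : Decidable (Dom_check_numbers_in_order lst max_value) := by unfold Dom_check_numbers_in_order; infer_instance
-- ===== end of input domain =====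

-- B replaces A's interleaved per-index scan (with its redundant (i+1)%n wraparound) by a
-- precomputed adjacency table plus a filtering pass; same O(n) cost, plainer structure.

-- ===== PORT A =====
def check_numbers_in_order (lst : List Int) (max_value : Int) : List Int :=
  let n : Int := lst.length
  (PySem.List.pyRange 1 (n - 1) 1).foldl (fun result i =>
    let current_element := PySem.List.pyGetD lst i 0
    let next_element := PySem.List.pyGetD lst (PySem.Int.mod (i + 1) n) 0
    let prev_element := PySem.List.pyGetD lst (i - 1) 0
    if current_element ≥ next_element ∨ current_element ≤ prev_element then
      result ++ [i]
    else result) []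

-- ===== PORT B =====
def check_numbers_in_order_alt (lst : List Int) (max_value : Int) : List Int :=
  let n : Int := lst.length
  let inc : List Bool :=
    (PySem.List.pyRange 0 (n - 1) 1).map
      (fun j => decide (PySem.List.pyGetD lst j 0 < PySem.List.pyGetD lst (j + 1) 0))
  (PySem.List.pyRange 1 (n - 1) 1).filter
    (fun i => !(PySem.List.pyGetD inc (i - 1) false) || !(PySem.List.pyGetD inc i false))

-- ===== PRECONDITION & SPEC =====
def Spec_check_numbers_in_order (lst : List Int) (max_value : Int) (out : List Int) : Prop := out = check_numbers_in_order_alt lst max_value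
instance (lst : List Int) (max_value : Int) (out : List Int) : Decidable (Spec_check_numbers_in_order lst max_value out) := by unfold Spec_check_numbers_in_order; infer_instance

-- ===== CLAIM (what is proved, stated in full; the proofs are below) =====
def Claim_equal_check_numbers_in_order : Prop := ∀ (lst : List Int) (max_value : Int), Dom_check_numbers_in_order lst max_value → Spec_check_numbers_in_order lst max_value (check_numbers_in_order lst max_value)

-- ===== LEMMAS AND PROOFS =====

theorem pv_mod_self_of_lt (x n : Int) (h0 : 0 ≤ x) (h1 : x < n) : PySem.Int.mod x n = x := by
  simp only [PySem.Int.mod]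
  rw [Int.fmod_eq_emod]
  have := Int.emod_eq_of_lt h0 h1
  simp [this]
  omega

theorem pv_cond_eq (lst : List Int) (i : Int) (h1 : 1 ≤ i) (h2 : i < (lst.length : Int) - 1) :
    decide (PySem.List.pyGetD lst i 0 ≥ PySem.List.pyGetD lst (PySem.Int.mod (i + 1) (lst.length : Int)) 0
      ∨ PySem.List.pyGetD lst i 0 ≤ PySem.List.pyGetD lst (i - 1) 0)
    = (!(PySem.List.pyGetD ((PySem.List.pyRange 0 ((lst.length : Int) - 1) 1).map
          (fun j => decide (PySem.List.pyGetD lst j 0 < PySem.List.pyGetD lst (j + 1) 0))) (i - 1) false)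
       || !(PySem.List.pyGetD ((PySem.List.pyRange 0 ((lst.length : Int) - 1) 1).map
          (fun j => decide (PySem.List.pyGetD lst j 0 < PySem.List.pyGetD lst (j + 1) 0))) i false)) := by
  rw [pv_mod_self_of_lt (i + 1) (lst.length : Int) (by omega) (by omega)]
  rw [PySem.List.pyGetD_map_pyRange_of_nonneg _ _ _ _ (by omega) (by omega)]
  rw [PySem.List.pyGetD_map_pyRange_of_nonneg _ _ _ _ (by omega) (by omega)]
  have : i - 1 + 1 = i := by omega
  rw [this]
  by_cases ha : PySem.List.pyGetD lst (i - 1) 0 < PySem.List.pyGetD lst i 0 <;>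
    by_cases hb : PySem.List.pyGetD lst i 0 < PySem.List.pyGetD lst (i + 1) 0 <;>
    simp [ha, hb] <;> omega

-- ===== VERDICT (by name: the statement is the Claim_ definition above) =====
theorem check_numbers_in_order_spec : Claim_equal_check_numbers_in_order := by
  intro lst max_value _
  unfold Spec_check_numbers_in_order check_numbers_in_order check_numbers_in_order_alt
  rw [PySem.List.foldl_append_ite_eq_filter]
  rw [List.nil_append]
  apply List.filter_congr
  intro i hi
  rw [PySem.List.mem_pyRange_one] at hi
  exact pv_cond_eq lst i hi.1 hi.2
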